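-- pv_equiv track=rewrite | github.com/scrapy/scrapy | scrapy/commands/__init__.py | format_part_strings
-- ===== SOURCE A (Python) =====
-- def format_part_strings(part_strings: list[str]) -> list[str]:
--     """
--     Underline and title case command line help message headers.
--     """
--     if part_strings and part_strings[0].startswith("usage: "):
--         part_strings[0] = "Usage\n=====\n  " + part_strings[0][len("usage: ") :]
--     headings = [
--         i for i in range(len(part_strings)) if part_strings[i].endswith(":\n")
--     ]
--     for index in headings[::-1]:
--         char = "-" if "Global Options" in part_strings[index] else "="
--         part_strings[index] = part_strings[index][:-2].title()
--         underline = "".join(["\n", (char * len(part_strings[index])), "\n"])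
--         part_strings.insert(index + 1, underline)
--     return part_strings
-- ===== SOURCE B (Python) =====
-- def format_part_strings(part_strings: list[str]) -> list[str]:
--     """
--     Underline and title case command line help message headers.
--     Single forward pass; input list mutated in place via slice assignment.
--     """
--     out = []
--     for i, s in enumerate(part_strings):
--         if i == 0 and s.startswith("usage: "):
--             s = "Usage\n=====\n  " + s[len("usage: "):]
--         if s.endswith(":\n"):
--             title = s[:-2].title()
--             out.append(title)
--             out.append("\n" + ("-" if "Global Options" in s else "=") * len(title) + "\n")
--         else:
--             out.append(s)
--     part_strings[:] = out
--     return part_strings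
-- ===== Notes on version B (the rewrite author's own statement) =====
-- stated objective: simpler
-- what changed: Replaces the two-pass scheme (collect heading indices, then insert underlines at reversed indices to keep positions stable) by one forward pass that emits each element, expanding headings into title plus underline as it goes, and slice-assigns the result back.
import Mathlib
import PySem

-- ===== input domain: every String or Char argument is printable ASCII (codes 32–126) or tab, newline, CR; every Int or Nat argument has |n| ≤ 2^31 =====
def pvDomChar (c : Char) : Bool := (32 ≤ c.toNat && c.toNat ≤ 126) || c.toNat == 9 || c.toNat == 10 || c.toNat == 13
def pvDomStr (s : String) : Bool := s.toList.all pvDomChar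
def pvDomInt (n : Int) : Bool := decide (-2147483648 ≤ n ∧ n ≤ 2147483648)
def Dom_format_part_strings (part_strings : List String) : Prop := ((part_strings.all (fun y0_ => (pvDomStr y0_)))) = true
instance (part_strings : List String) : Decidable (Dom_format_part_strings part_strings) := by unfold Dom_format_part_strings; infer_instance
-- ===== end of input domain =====

-- B replaces A's two-pass scheme (collect heading indices, then insert underlines at the
-- reversed indices) by a single forward pass that expands each heading in place (objective:
-- simpler).  Both Pythons mutate the argument list in place; the equivalence proved here is
-- about the returned value (Source B performs the same mutation via slice assignment).

-- ===== PORT A =====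
-- str.title() for ASCII (exact on Dom): a letter is uppercased after a non-letter, lowercased
-- after a letter; Python's 'cased' characters are exactly the letters on this ASCII domain.
def pvTitleGo : Bool → List Char → List Char
  | _, [] => []
  | prev, c :: r =>
    if PySem.Chars.isalpha c then
      (if prev then PySem.Chars.lowerChar c else PySem.Chars.upperChar c) :: pvTitleGo true r
    else c :: pvTitleGo false r

-- "Usage\n=====\n  " + s[len("usage: "):]
def pvUsageFix (s : String) : String :=
  String.ofList ("Usage\n=====\n  ".toList ++ PySem.Chars.slice s.toList (some 7) none)

-- part_strings[index][:-2].title()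
def pvTitleOf (s : String) : String :=
  String.ofList (pvTitleGo false (PySem.Chars.slice s.toList none (some (-2))))

-- the body of A's 'for index in headings[::-1]' loop
def pvStepA (ps : List String) (index : Nat) : List String :=
  let cur := ps.getD index ""
  let ch : Char := if PySem.Str.isIn "Global Options" cur then '-' else '='
  let title := pvTitleOf cur
  let ps2 := ps.set index title
  let underline := String.ofList ('\n' :: (List.replicate title.toList.length ch ++ ['\n']))
  PySem.List.insert ps2 ((index + 1 : Nat) : Int) underline

-- [i for i in range(len(ps)) if ps[i].endswith(":\n")]
def pvHeadings (ps : List String) : List Nat :=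
  (List.range ps.length).filter (fun i => PySem.Str.endswith (ps.getD i "") ":\n")

def format_part_strings (part_strings : List String) : List String :=
  let ps : List String :=
    match part_strings with
    | [] => []
    | s :: rest =>
      if PySem.Str.startswith s "usage: " then pvUsageFix s :: rest else s :: rest
  -- headings[::-1] is List.reverse (PySem.List.slice?_none_none_neg_one)
  (pvHeadings ps).reverse.foldl pvStepA ps

-- ===== PORT B =====
-- one loop iteration of Source B: a heading becomes [title, underline], anything else [s]
def pvExpand (s : String) : List String :=
  if PySem.Str.endswith s ":\n" then
    let title := pvTitleOf s
    [title,
     String.ofList ('\n' :: (List.replicate title.toList.length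
        (if PySem.Str.isIn "Global Options" s then '-' else '=') ++ ['\n']))]
  else [s]

def format_part_strings_alt (part_strings : List String) : List String :=
  match part_strings with
  | [] => []
  | s :: rest =>
    pvExpand (if PySem.Str.startswith s "usage: " then pvUsageFix s else s)
      ++ rest.flatMap pvExpand

-- ===== PRECONDITION & SPEC =====
def Spec_format_part_strings (part_strings : List String) (out : List String) : Prop := out = format_part_strings_alt part_strings
instance (part_strings : List String) (out : List String) : Decidable (Spec_format_part_strings part_strings out) := by unfold Spec_format_part_strings; infer_instance

-- ===== CLAIM (what is proved, stated in full; the proofs are below) =====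
def Claim_equal_format_part_strings : Prop := ∀ (part_strings : List String), Dom_format_part_strings part_strings → Spec_format_part_strings part_strings (format_part_strings part_strings)

-- ===== LEMMAS AND PROOFS =====

theorem pvStepA_length (ps : List String) (i : Nat) (h : i < ps.length) :
    (pvStepA ps i).length = ps.length + 1 := by
  unfold pvStepA
  rw [PySem.List.insert_natCast _ _ _ (by simpa using Nat.succ_le_of_lt h)]
  simp

theorem pvStepA_cons (s : String) (ps : List String) (i : Nat) (h : i < ps.length) :
    pvStepA (s :: ps) (i + 1) = s :: pvStepA ps i := by
  unfold pvStepA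
  rw [PySem.List.insert_natCast _ (i + 1 + 1) _ (by simpa using Nat.succ_le_of_lt h),
      PySem.List.insert_natCast _ (i + 1) _ (by simpa using Nat.succ_le_of_lt h)]
  simp

theorem foldl_stepA_map_succ (idxs : List Nat) (s : String) (ps : List String)
    (h : ∀ i ∈ idxs, i < ps.length) :
    (idxs.map (· + 1)).foldl pvStepA (s :: ps) = s :: idxs.foldl pvStepA ps := by
  induction idxs generalizing ps with
  | nil => rfl
  | cons i rest ih =>
    have hi : i < ps.length := h i (by simp)
    simp only [List.map_cons, List.foldl_cons, pvStepA_cons s ps i hi]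
    exact ih (pvStepA ps i) (fun j hj => lt_of_lt_of_le (h j (by simp [hj]))
      (by rw [pvStepA_length ps i hi]; omega))

theorem pvHeadings_cons (s : String) (ps : List String) :
    pvHeadings (s :: ps) =
      (if PySem.Str.endswith s ":\n" then [0] else []) ++ (pvHeadings ps).map (· + 1) := by
  unfold pvHeadings
  rw [List.length_cons, List.range_succ_eq_map, List.filter_cons]
  simp only [List.getD_cons_zero]
  rw [List.filter_map]
  split <;> simp [Function.comp_def]

theorem pvHeadings_lt (ps : List String) : ∀ i ∈ pvHeadings ps, i < ps.length := by
  intro i hi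
  unfold pvHeadings at hi
  exact List.mem_range.mp (List.mem_of_mem_filter hi)

theorem main_flat (ps : List String) :
    (pvHeadings ps).reverse.foldl pvStepA ps = ps.flatMap pvExpand := by
  induction ps with
  | nil => rfl
  | cons s rest ih =>
    rw [pvHeadings_cons, List.reverse_append, List.map_reverse.symm, List.foldl_append,
        foldl_stepA_map_succ _ s rest
          (fun i hi => pvHeadings_lt rest i (List.mem_reverse.mp hi)),
        ih]
    by_cases hE : PySem.Str.endswith s ":\n"
    · rw [if_pos hE]
      have h1 : (1 : Nat) ≤ (pvTitleOf s :: rest.flatMap pvExpand).length := by simp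
      simp only [List.reverse_cons, List.reverse_nil, List.nil_append, List.foldl_cons,
        List.foldl_nil, List.flatMap_cons, pvStepA, List.getD_cons_zero, List.set_cons_zero]
      rw [PySem.List.insert_natCast _ 1 _ h1]
      simp only [pvExpand]
      rw [if_pos hE]
      simp
    · rw [if_neg hE]
      simp only [List.flatMap_cons, pvExpand]
      rw [if_neg hE]
      simp

-- ===== VERDICT (by name: the statement is the Claim_ definition above) =====
theorem format_part_strings_spec : Claim_equal_format_part_strings := by
  intro part_strings _
  unfold Spec_format_part_strings format_part_strings format_part_strings_alt
  match part_strings with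
  | [] => rfl
  | s :: rest =>
    cases hU : PySem.Str.startswith s "usage: " <;>
      simp only [hU, Bool.false_eq_true, reduceIte, if_false] <;>
      rw [main_flat, List.flatMap_cons]
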